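-- pv_equiv track=rewrite | github.com/markrosito/simple-genome-assembler | GenomeAssembler.py | getAllOverlaps
-- ===== SOURCE A (Python) =====
-- def getOverlap(left, right):
--     """
--     This function finds the overlapping characters between two strings.
--     In the DNA case, it checks if the 3' end of the left read
--     overlaps the 5' end of the right read.
--     It checks all possible combinations and it returns the overlapping sequence
--     in the form of a string, if any overlap exists.
--
--     Params:
--         left (str): The left sequence.
--         right (str): The right sequence.
--
--     Returns:
--         overlap (str): The overlap sequence.
--     """
--     overlap = ''
--     for i in range(min(len(left), len(right))-1):
--         if right[:i+1] == left[-i-1:]: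
--             overlap = right[:i+1]
--     return overlap
--
-- def getAllOverlaps(reads):
--     """
--     This function finds all overlaps between all the sequences in a
--     dictionary in the form returned from the readDataFromFile() function.
--
--     Params:
--         reads (dict): A dictionary as produced by readDataFromFile().
--
--     Returns:
--         d (dict): A dictionary of dictionaries with overlaps length
--     """
--     d = {}
--     for i in reads.keys():
--         d[i] = {}
--         for j in reads.keys():
--             if i != j:
--                 d[i] = {**d[i], j : len(getOverlap(reads[i], reads[j]))}
--     return d
-- ===== SOURCE B (Python) =====
-- def _matchAt(left, right, nl, k):
--     # do the k characters of right's prefix match left's tail starting at nl-k?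
--     i = 0
--     while i < k and left[nl - k + i] == right[i]:
--         i += 1
--     return i == k
--
-- def _overlapLen(left, right):
--     # longest k <= min(len(left), len(right)) - 1 with left ending in right[:k],
--     # found by scanning k downward and stopping at the first (= longest) match
--     nl = len(left)
--     k = min(nl, len(right)) - 1
--     while k > 0:
--         if _matchAt(left, right, nl, k):
--             return k
--         k -= 1
--     return 0
--
-- def getAllOverlaps(reads):
--     keys = list(reads)
--     return {a: {b: _overlapLen(reads[a], reads[b]) for b in keys if a != b}
--             for a in keys}
-- ===== Notes on version B (the rewrite author's own statement) =====
-- stated objective: alternative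
-- what changed: Per pair, B searches candidate overlap lengths downward and returns the first (= longest) match via index-wise character comparison with early exit, instead of A's upward scan that builds two fresh slice strings per candidate and keeps the last matching slice; rows are emitted once as comprehensions instead of A's repeated {**d[i], j: v} dict re-merging.
import Mathlib
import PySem

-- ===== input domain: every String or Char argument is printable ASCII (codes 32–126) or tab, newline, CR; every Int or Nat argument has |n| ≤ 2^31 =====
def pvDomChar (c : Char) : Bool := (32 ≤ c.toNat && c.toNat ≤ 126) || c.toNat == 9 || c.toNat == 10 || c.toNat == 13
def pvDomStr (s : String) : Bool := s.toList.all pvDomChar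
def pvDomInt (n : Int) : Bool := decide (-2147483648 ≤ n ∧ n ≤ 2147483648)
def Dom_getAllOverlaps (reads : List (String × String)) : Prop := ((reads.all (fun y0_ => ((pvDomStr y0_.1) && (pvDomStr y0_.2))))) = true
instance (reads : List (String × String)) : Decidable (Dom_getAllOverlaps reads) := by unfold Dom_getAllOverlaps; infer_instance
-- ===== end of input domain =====

-- B replaces A's upward scan, which rebuilds and keeps the last matching slice pair, by a
-- downward search that returns the first (= longest) overlap length directly, comparing
-- characters by index with early exit instead of constructing slice strings. (objective: alternative)

-- ===== PORT A =====
-- getOverlap: overlap = ''; for i in range(min(len(left), len(right))-1):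
--   if right[:i+1] == left[-i-1:]: overlap = right[:i+1];  return overlap
def getOverlapA (left right : List Char) : List Char :=
  (PySem.List.pyRange 0 (min (PySem.List.len left) (PySem.List.len right) - 1) 1).foldl
    (fun ov i =>
      if PySem.List.slice right none (some (i + 1)) = PySem.List.slice left (some (-i - 1)) none
      then PySem.List.slice right none (some (i + 1)) else ov) []

-- d = {}; for i in reads.keys(): d[i] = {}; for j in reads.keys():
--   if i != j: d[i] = {**d[i], j: len(getOverlap(reads[i], reads[j]))}
-- reads[i] and d[i] are always present here (i is a key / was just inserted), so the getD defaults are never used.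
def getAllOverlaps (reads : List (String × String)) : List (String × List (String × Int)) :=
  let rd : PySem.Dict String String := PySem.Dict.ofList reads
  let d : PySem.Dict String (PySem.Dict String Int) :=
    rd.keys.foldl (fun d i =>
      rd.keys.foldl (fun d j =>
        if i ≠ j then
          d.insert i ((d.getD i PySem.Dict.empty).insert j
            (PySem.List.len (getOverlapA (rd.getD i "").toList (rd.getD j "").toList)))
        else d) (d.insert i PySem.Dict.empty)) PySem.Dict.empty
  d.items.map (fun p => (p.1, p.2.items))

-- ===== PORT B =====
-- _matchAt: i = 0; while i < k and left[nl - k + i] == right[i]: i += 1; return i == k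
-- (called only with k ≤ len(left) and k ≤ len(right), so the indices are in range and the getD defaults unused)
def matchAtB (left right : List Char) (nl k i : Nat) : Bool :=
  if h : i < k then
    if left.getD (nl - k + i) ' ' = right.getD i ' ' then matchAtB left right nl k (i + 1)
    else false
  else true
termination_by k - i

-- _overlapLen's while loop: while k > 0: if _matchAt(left, right, nl, k): return k; k -= 1; return 0
def descendB (left right : List Char) (nl : Nat) : Nat → Nat
  | 0 => 0
  | k + 1 => if matchAtB left right nl (k + 1) 0 then k + 1 else descendB left right nl k

def overlapLenB (left right : List Char) : Nat :=
  descendB left right left.length (min left.length right.length - 1)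

-- {a: {b: _overlapLen(reads[a], reads[b]) for b in keys if a != b} for a in keys}  (dict keys are distinct)
def getAllOverlaps_alt (reads : List (String × String)) : List (String × List (String × Int)) :=
  let rd : PySem.Dict String String := PySem.Dict.ofList reads
  rd.keys.map (fun a =>
    (a, (rd.keys.filter (fun b => a ≠ b)).map (fun b =>
          (b, (overlapLenB (rd.getD a "").toList (rd.getD b "").toList : Int)))))

-- ===== PRECONDITION & SPEC =====
def Spec_getAllOverlaps (reads : List (String × String)) (out : List (String × List (String × Int))) : Prop := out = getAllOverlaps_alt reads
instance (reads : List (String × String)) (out : List (String × List (String × Int))) : Decidable (Spec_getAllOverlaps reads out) := by unfold Spec_getAllOverlaps; infer_instance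

-- ===== CLAIM (what is proved, stated in full; the proofs are below) =====
def Claim_equal_getAllOverlaps : Prop := ∀ (reads : List (String × String)), Dom_getAllOverlaps reads → Spec_getAllOverlaps reads (getAllOverlaps reads)

-- ===== LEMMAS AND PROOFS =====

-- B's inner while loop succeeds iff every compared character pair agrees
theorem matchAtB_iff_gen (l r : List Char) (nl k : Nat) :
    ∀ i, matchAtB l r nl k i = true ↔ ∀ j, i ≤ j → j < k → l.getD (nl - k + j) ' ' = r.getD j ' ' := by
  intro i
  induction' hn : k - i using Nat.strong_induction_on with n ih generalizing i
  unfold matchAtB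
  by_cases h : i < k
  · simp only [h, dif_pos]
    by_cases he : l.getD (nl - k + i) ' ' = r.getD i ' '
    · rw [if_pos he, ih (k - (i + 1)) (by omega) (i + 1) rfl]
      constructor
      · intro hall j hij hjk
        rcases Nat.eq_or_lt_of_le hij with h1 | h1
        · subst h1; exact he
        · exact hall j h1 hjk
      · intro hall j hij hjk; exact hall j (by omega) hjk
    · simp only [if_neg he, Bool.false_eq_true, false_iff]
      push Not
      exact ⟨i, le_refl i, h, he⟩
  · simp only [h]
    constructor
    · intro _ j hij hjk; omega
    · intro _; rfl

-- … i.e. iff right's k-prefix equals left's k-suffix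
theorem matchAtB_iff (l r : List Char) (k : Nat) (hkl : k ≤ l.length) (hkr : k ≤ r.length) :
    matchAtB l r l.length k 0 = true ↔ r.take k = l.drop (l.length - k) := by
  rw [matchAtB_iff_gen]
  constructor
  · intro hall
    apply List.ext_getElem
    · simp; omega
    · intro j hj1 hj2
      simp only [List.length_take] at hj1
      have hjk : j < k := by omega
      have := hall j (by omega) hjk
      rw [List.getD_eq_getElem l ' ' (by omega), List.getD_eq_getElem r ' ' (by omega)] at this
      rw [List.getElem_take, List.getElem_drop]
      exact this.symm
  · intro heq j _ hjk
    rw [List.getD_eq_getElem l ' ' (by omega), List.getD_eq_getElem r ' ' (by omega)]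
    have h1 : (List.take k r)[j]'(by simp; omega) = (List.drop (l.length - k) l)[j]'(by simp; omega) := by
      simp only [heq]
    rw [List.getElem_take, List.getElem_drop] at h1
    exact h1.symm

-- A's loop, with the pyRange and the two slices rewritten to take/drop form
theorem getOverlapA_eq_gfold (l r : List Char) : getOverlapA l r =
    (List.range (min l.length r.length - 1)).foldl
      (fun ov k => if r.take (k + 1) = l.drop (l.length - (k + 1)) then r.take (k + 1) else ov) [] := by
  unfold getOverlapA
  rw [PySem.List.pyRange_one, List.foldl_map]
  have hN : ((min (PySem.List.len l) (PySem.List.len r) - 1) - 0).toNat = min l.length r.length - 1 := by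
    simp [PySem.List.len_eq]
    omega
  rw [hN]
  congr 1
  funext ov k
  rw [show (0:Int) + (k:Int) + 1 = ((k + 1 : Nat) : Int) by push_cast; ring]
  rw [show -((0:Int) + (k:Int)) - 1 = -((k + 1 : Nat) : Int) by push_cast; ring]
  rw [PySem.List.slice_to_natCast, PySem.List.slice_from_neg_natCast _ _ (by omega)]

-- the length of the last match of A's upward scan = B's first match scanning downward
theorem fold_eq_descend (l r : List Char) (N : Nat) (hN : N ≤ min l.length r.length - 1) :
    ((List.range N).foldl
      (fun ov k => if r.take (k + 1) = l.drop (l.length - (k + 1)) then r.take (k + 1) else ov) []).length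
    = descendB l r l.length N := by
  induction N with
  | zero => simp [descendB]
  | succ n ih =>
    rw [List.range_succ, List.foldl_append]
    simp only [List.foldl_cons, List.foldl_nil]
    have hnl : n + 1 ≤ l.length := by omega
    have hnr : n + 1 ≤ r.length := by omega
    by_cases hc : r.take (n + 1) = l.drop (l.length - (n + 1))
    · rw [if_pos hc]
      have : matchAtB l r l.length (n + 1) 0 = true := (matchAtB_iff l r (n + 1) hnl hnr).mpr hc
      simp [descendB, this, List.length_take]
      omega
    · rw [if_neg hc]
      have : matchAtB l r l.length (n + 1) 0 = false := by
        rw [← Bool.not_eq_true, matchAtB_iff l r (n + 1) hnl hnr]; exact hc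
      simp [descendB, this]
      exact ih (by omega)

-- per-pair: A's overlap string has exactly B's overlap length
theorem overlap_pair (l r : List Char) :
    PySem.List.len (getOverlapA l r) = ((overlapLenB l r : Nat) : Int) := by
  rw [PySem.List.len_eq, getOverlapA_eq_gfold, fold_eq_descend l r _ (le_refl _)]
  rfl

-- re-inserting at the same key overwrites
theorem ins_ins {κ ν : Type} [BEq κ] [LawfulBEq κ] (d : PySem.Dict κ ν) (k : κ) (v w : ν) :
    (d.insert k v).insert k w = d.insert k w := by
  apply PySem.Dict.ext
  by_cases h : d.contains k
  · rw [PySem.Dict.items_insert_of_contains _ w (PySem.Dict.contains_insert_self d k v),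
        PySem.Dict.items_insert_of_contains _ v h,
        PySem.Dict.items_insert_of_contains _ w h, List.map_map]
    apply List.map_congr_left
    intro p _
    by_cases hp : p.1 == k <;> simp [hp]
  · rw [PySem.Dict.items_insert_of_contains _ w (PySem.Dict.contains_insert_self d k v),
        PySem.Dict.items_insert_of_not_contains _ v (by simpa using h),
        PySem.Dict.items_insert_of_not_contains _ w (by simpa using h),
        List.map_append]
    have hmap : List.map (fun p => if (p.1 == k) = true then (k, w) else p) d.items = d.items := by
      have := List.map_congr_left (l := d.items)
        (f := fun p : κ × ν => if (p.1 == k) = true then (k, w) else p) (g := id) ?_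
      · simpa using this
      · intro p hp
        have : p.1 ≠ k := by
          intro hk
          exact h ((PySem.Dict.contains_iff_mem_keys d k).mpr (hk ▸ PySem.Dict.mem_keys_of_mem_items _ hp))
        simp [this]
    simp [hmap]

-- A's inner loop over j only ever rewrites row i: it is one insert of the accumulated row
theorem inner_fold (V : String → Int) (i : String) :
    ∀ (ks : List String) (d : PySem.Dict String (PySem.Dict String Int)) (r0 : PySem.Dict String Int),
    ks.foldl (fun d j => if i ≠ j then d.insert i ((d.getD i PySem.Dict.empty).insert j (V j)) else d) (d.insert i r0)
    = d.insert i (ks.foldl (fun row j => if i ≠ j then row.insert j (V j) else row) r0) := by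
  intro ks
  induction ks with
  | nil => intro d r0; simp
  | cons j ks ih =>
    intro d r0
    simp only [List.foldl_cons]
    by_cases hij : i ≠ j
    · rw [if_pos hij, if_pos hij, PySem.Dict.getD_insert_self, ins_ins]
      exact ih d (r0.insert j (V j))
    · rw [if_neg hij, if_neg hij]
      exact ih d r0

-- a row built by guarded inserts over distinct keys, as an association list
theorem row_items (V : String → Int) (i : String) (ks : List String) (h : ks.Nodup) :
    (ks.foldl (fun row j => if i ≠ j then row.insert j (V j) else row)
      (PySem.Dict.empty : PySem.Dict String Int)).items
    = (ks.filter (fun j => i ≠ j)).map (fun j => (j, V j)) := by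
  have hfun : (fun (row : PySem.Dict String Int) j => if i ≠ j then row.insert j (V j) else row)
      = (fun row j => if (fun j => decide (i ≠ j)) j = true then row.insert j (V j) else row) := by
    funext row j
    by_cases hij : i = j <;> simp [hij]
  rw [hfun, ← List.foldl_filter,
      PySem.Dict.items_foldl_insert_fresh _ (fun a => a) V _
        (fun a _ => PySem.Dict.contains_empty a) (by simpa using h.filter _)]
  simp [PySem.Dict.empty]

-- A's whole dict-of-dicts loop, as an association list of rows
theorem outer_items (V : String → String → Int) (ks : List String) (h : ks.Nodup) :
    (ks.foldl (fun d i => ks.foldl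
        (fun d j => if i ≠ j then d.insert i ((d.getD i PySem.Dict.empty).insert j (V i j)) else d)
        (d.insert i PySem.Dict.empty))
      (PySem.Dict.empty : PySem.Dict String (PySem.Dict String Int))).items
    = ks.map (fun i => (i, ks.foldl (fun row j => if i ≠ j then row.insert j (V i j) else row) PySem.Dict.empty)) := by
  have hfun : (fun (d : PySem.Dict String (PySem.Dict String Int)) i => ks.foldl
        (fun d j => if i ≠ j then d.insert i ((d.getD i PySem.Dict.empty).insert j (V i j)) else d)
        (d.insert i PySem.Dict.empty))
      = (fun d i => d.insert i (ks.foldl (fun row j => if i ≠ j then row.insert j (V i j) else row) PySem.Dict.empty)) := by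
    funext d i
    exact inner_fold (V i) i ks d PySem.Dict.empty
  rw [hfun,
      PySem.Dict.items_foldl_insert_fresh _ (fun a => a) _ _
        (fun a _ => PySem.Dict.contains_empty a) (by simpa using h)]
  simp [PySem.Dict.empty]

theorem getAllOverlaps_eq (reads : List (String × String)) :
    getAllOverlaps reads = getAllOverlaps_alt reads := by
  unfold getAllOverlaps getAllOverlaps_alt
  dsimp only
  rw [outer_items (fun i j => PySem.List.len (getOverlapA ((PySem.Dict.ofList reads).getD i "").toList
        ((PySem.Dict.ofList reads).getD j "").toList)) _ (PySem.Dict.nodup_keys_ofList reads),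
      List.map_map]
  apply List.map_congr_left
  intro i _
  simp only [Function.comp]
  rw [row_items _ i _ (PySem.Dict.nodup_keys_ofList reads)]
  apply congrArg
  apply List.map_congr_left
  intro j _
  rw [overlap_pair]

-- ===== VERDICT (by name: the statement is the Claim_ definition above) =====
theorem getAllOverlaps_spec : Claim_equal_getAllOverlaps := by
  intro reads _
  unfold Spec_getAllOverlaps
  exact getAllOverlaps_eq reads
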